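-- pv_equiv track=rewrite | github.com/enaa99/Algorithm | baekjoonPython/프로그래머스/귤고르기.py | solution
-- ===== SOURCE A (Python) =====
-- from collections import defaultdict
-- from collections import Counter
--
-- def solution(k,tangerine):
--     answer = 0
--
--     guel = defaultdict(int)
--
--     temp = Counter(tangerine)
--
--
--     for i in tangerine:
--         guel[i] += 1
--
--     tmp = []
--     for i in guel.values():
--         tmp.append(i)
--
--     tmp.sort(reverse=True)
--
--
--     for i in tmp:
--         if k <= 0:
--             break
--         answer +=1
--         k -= i
--
--     return answer
-- ===== SOURCE B (Python) =====
-- from collections import Counter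
--
-- def solution(k, tangerine):
--     # counting-sort-style bucket walk over frequencies, no comparison sort
--     cnt = Counter(tangerine)
--     freq = Counter(cnt.values())
--     answer = 0
--     for c in range(len(tangerine), 0, -1):
--         for _ in range(freq[c]):
--             if k <= 0:
--                 return answer
--             answer += 1
--             k -= c
--     return answer
-- ===== Notes on version B (the rewrite author's own statement) =====
-- stated objective: alternative
-- what changed: Replaces the descending comparison sort of the per-size counts with a counting-sort-style bucket walk: tally how many sizes have each frequency, then walk frequencies from len(tangerine) down to 1, consuming bucket-many sizes at each frequency until k is exhausted.
import Mathlib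
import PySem

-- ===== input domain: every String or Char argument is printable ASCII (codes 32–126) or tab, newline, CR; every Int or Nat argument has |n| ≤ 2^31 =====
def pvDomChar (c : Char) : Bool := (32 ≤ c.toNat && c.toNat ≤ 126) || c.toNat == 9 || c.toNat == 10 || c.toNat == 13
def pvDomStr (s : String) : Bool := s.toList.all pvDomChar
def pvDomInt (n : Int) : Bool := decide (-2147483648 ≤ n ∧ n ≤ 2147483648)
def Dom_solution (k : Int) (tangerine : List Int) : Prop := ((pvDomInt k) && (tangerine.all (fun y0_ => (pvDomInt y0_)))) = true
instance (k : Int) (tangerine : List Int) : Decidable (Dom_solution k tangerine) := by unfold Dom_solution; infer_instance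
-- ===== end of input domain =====

-- B replaces A's descending sort of the counts by a counting-sort-style bucket walk; equivalence of return values is proved.

-- ===== PORT A =====
-- greedy loop: 'for i in tmp: if k <= 0: break; answer += 1; k -= i'
def greedyA : List Int → Int → Int → Int
  | [], _, answer => answer
  | i :: rest, k, answer => if k ≤ 0 then answer else greedyA rest (k - i) (answer + 1)

def solution (k : Int) (tangerine : List Int) : Int :=
  -- guel = defaultdict(int); temp = Counter(tangerine) (unused); for i in tangerine: guel[i] += 1
  let guel : PySem.Dict Int Int := tangerine.foldl (fun d i => d.modify i 0 (· + 1)) PySem.Dict.empty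
  -- tmp = []; for i in guel.values(): tmp.append(i)
  let tmp : List Int := guel.values.foldl (fun acc i => acc ++ [i]) []
  -- tmp.sort(reverse=True)
  let tmp2 := PySem.List.sorted tmp (fun x => x) true
  greedyA tmp2 k 0

-- ===== PORT B =====
-- inner loop 'for _ in range(freq[c]): if k <= 0: return answer; answer += 1; k -= c'
-- result: ((k, answer), early-return flag)
def altInner (c : Int) : Nat → Int → Int → (Int × Int) × Bool
  | 0, k, answer => ((k, answer), false)
  | m + 1, k, answer => if k ≤ 0 then ((k, answer), true) else altInner c m (k - c) (answer + 1)

-- outer loop 'for c in range(len(tangerine), 0, -1)'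
def altOuter (freq : PySem.Dict Int Int) : Nat → Int → Int → Int
  | 0, _, answer => answer
  | c + 1, k, answer =>
    let r := altInner ((c : Int) + 1) ((freq.getD ((c : Int) + 1) 0).toNat) k answer
    if r.2 then r.1.2 else altOuter freq c r.1.1 r.1.2

def solution_alt (k : Int) (tangerine : List Int) : Int :=
  let cnt := PySem.Dict.counter tangerine
  let freq := PySem.Dict.counter cnt.values
  altOuter freq tangerine.length k 0

-- ===== PRECONDITION & SPEC =====
def Spec_solution (k : Int) (tangerine : List Int) (out : Int) : Prop := out = solution_alt k tangerine
instance (k : Int) (tangerine : List Int) (out : Int) : Decidable (Spec_solution k tangerine out) := by unfold Spec_solution; infer_instance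

-- ===== CLAIM (what is proved, stated in full; the proofs are below) =====
def Claim_equal_solution : Prop := ∀ (k : Int) (tangerine : List Int), Dom_solution k tangerine → Spec_solution k tangerine (solution k tangerine)

-- ===== LEMMAS AND PROOFS =====

-- the list of counts B's bucket walk effectively traverses, for c = n, n-1, …, 1
def bucketsList (freq : PySem.Dict Int Int) : Nat → List Int
  | 0 => []
  | c + 1 => List.replicate ((freq.getD ((c : Int) + 1) 0).toNat) ((c : Int) + 1) ++ bucketsList freq c

lemma greedyA_replicate (c : Int) (m : Nat) (rest : List Int) (k answer : Int) :
    greedyA (List.replicate m c ++ rest) k answer =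
      if (altInner c m k answer).2 then (altInner c m k answer).1.2
      else greedyA rest (altInner c m k answer).1.1 (altInner c m k answer).1.2 := by
  induction m generalizing k answer with
  | zero => simp [altInner]
  | succ m ih =>
    simp only [List.replicate_succ, List.cons_append, greedyA, altInner]
    by_cases hk : k ≤ 0
    · simp [hk]
    · simp only [hk, if_false]
      exact ih (k - c) (answer + 1)

lemma altOuter_eq_greedyA (freq : PySem.Dict Int Int) (c : Nat) (k answer : Int) :
    altOuter freq c k answer = greedyA (bucketsList freq c) k answer := by
  induction c generalizing k answer with
  | zero => simp [altOuter, bucketsList, greedyA]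
  | succ c ih =>
    rw [bucketsList, greedyA_replicate, altOuter]
    split
    · rfl
    · exact ih _ _

lemma count_bucketsList (freq : PySem.Dict Int Int) (c : Nat) (a : Int) :
    (bucketsList freq c).count a =
      if 1 ≤ a ∧ a ≤ (c : Int) then (freq.getD a 0).toNat else 0 := by
  induction c with
  | zero =>
    simp only [bucketsList, List.count_nil]
    split
    · omega
    · rfl
  | succ c ih =>
    simp only [bucketsList, List.count_append, ih, List.count_replicate, beq_iff_eq]
    by_cases h : ((c : Int) + 1) = a
    · subst h
      have h1 : (1 : Int) ≤ (c : Int) + 1 ∧ (c : Int) + 1 ≤ ((c : Nat) + 1 : Nat) :=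
        ⟨by omega, by push_cast; omega⟩
      have h2 : ¬ ((1 : Int) ≤ (c : Int) + 1 ∧ (c : Int) + 1 ≤ (c : Int)) := by omega
      rw [if_pos rfl, if_neg h2, if_pos h1, Nat.add_zero]
    · rw [if_neg h]
      push_cast
      split_ifs <;> omega
lemma pairwise_bucketsList (freq : PySem.Dict Int Int) (c : Nat) :
    (bucketsList freq c).Pairwise (fun a b => b ≤ a) ∧
      ∀ x ∈ bucketsList freq c, 1 ≤ x ∧ x ≤ (c : Int) := by
  induction c with
  | zero => simp [bucketsList]
  | succ c ih =>
    obtain ⟨hp, hb⟩ := ih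
    constructor
    · refine List.pairwise_append.mpr ⟨List.pairwise_replicate_of_refl, hp, ?_⟩
      intro a ha b hb'
      have := (List.eq_of_mem_replicate ha)
      have hbnd := hb b hb'
      omega
    · intro x hx
      rcases List.mem_append.mp hx with h | h
      · have := List.eq_of_mem_replicate h
        subst this
        exact ⟨by omega, by push_cast; omega⟩
      · have := hb x h
        push_cast
        omega

-- the values of Counter(tangerine) are the positive counts of its distinct elements
lemma vals_mem_bounds (t : List Int) :
    ∀ x ∈ (PySem.Dict.counter t).values, 1 ≤ x ∧ x ≤ (t.length : Int) := by
  intro x hx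
  have hv : (PySem.Dict.counter t).values
      = ((PySem.Set.ofList t).map (fun k => (t.count k : Int))) := by
    have := PySem.Dict.items_counter (xs := t)
    simp only [PySem.Dict.values, this, List.map_map]
    rfl
  rw [hv] at hx
  obtain ⟨kk, hk, rfl⟩ := List.mem_map.mp hx
  have hmem : kk ∈ t := by
    have : kk ∈ PySem.Set.ofList t := hk
    simpa [PySem.Set.mem_ofList] using this
  have h1 : 1 ≤ t.count kk := List.one_le_count_iff.mpr hmem
  have h2 : t.count kk ≤ t.length := List.count_le_length
  exact ⟨by exact_mod_cast h1, by exact_mod_cast h2⟩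

lemma perm_bucketsList (t : List Int) :
    (bucketsList (PySem.Dict.counter (PySem.Dict.counter t).values) t.length).Perm
      (PySem.Dict.counter t).values := by
  set vals := (PySem.Dict.counter t).values with hvals
  rw [List.perm_iff_count]
  intro a
  rw [count_bucketsList]
  have hg : ((PySem.Dict.counter vals).getD a 0) = (vals.count a : Int) :=
    PySem.Dict.getD_counter vals a
  by_cases h : (1 : Int) ≤ a ∧ a ≤ (t.length : Int)
  · simp [h, hg]
  · simp only [h, if_false]
    by_cases hm : a ∈ vals
    · exact absurd (vals_mem_bounds t a hm) h
    · simp [List.count_eq_zero_of_not_mem hm]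

lemma sorted_eq_bucketsList (t : List Int) :
    PySem.List.sorted (PySem.Dict.counter t).values (fun x => x) true
      = bucketsList (PySem.Dict.counter (PySem.Dict.counter t).values) t.length := by
  exact ((PySem.List.sorted_perm _ _ _).trans (perm_bucketsList t).symm).eq_of_pairwise
    (fun _ _ _ _ h h' => le_antisymm h' h)
    (PySem.List.sorted_pairwise_rev _ _) (pairwise_bucketsList _ _).1

-- ===== VERDICT (by name: the statement is the Claim_ definition above) =====
theorem solution_spec : Claim_equal_solution := by
  intro k t _
  show solution k t = solution_alt k t
  have hA : solution k t
      = greedyA (PySem.List.sorted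
          ((PySem.Dict.counter t).values.foldl (fun acc i => acc ++ [i]) [])
          (fun x => x) true) k 0 := rfl
  have hB : solution_alt k t
      = altOuter (PySem.Dict.counter (PySem.Dict.counter t).values) t.length k 0 := rfl
  rw [hA, hB, PySem.List.foldl_append_singleton_eq_self, List.nil_append,
    altOuter_eq_greedyA, sorted_eq_bucketsList]
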